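-- pv_equiv track=rewrite | github.com/MattJ12344/JavascriptWithRafal | folder 2024/skrót_3.py | nieparzysty_skrot
-- ===== SOURCE A (Python) =====
-- def nieparzysty_skrot(n):
--     potega = 1
--     m = 0
--     while n > 0:
--         cyfra = n % 10
--         if cyfra % 2 == 1:
--             m += potega * cyfra
--             potega *= 10
--         n //= 10
--
--     return m
-- ===== SOURCE B (Python) =====
-- def nieparzysty_skrot(n):
--     # Recursive, most-significant-digit-first: no place-value accumulator needed.
--     if n <= 0:
--         return 0
--     r = nieparzysty_skrot(n // 10)
--     d = n % 10
--     return r * 10 + d if d % 2 == 1 else r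
-- ===== Notes on version B (the rewrite author's own statement) =====
-- stated objective: simpler
-- what changed: Replaces the LSB-first while-loop with two accumulators (running result and place-value multiplier) by a direct MSB-first recursion that appends each odd digit by a decimal shift-and-add, needing no potega accumulator.
import Mathlib
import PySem

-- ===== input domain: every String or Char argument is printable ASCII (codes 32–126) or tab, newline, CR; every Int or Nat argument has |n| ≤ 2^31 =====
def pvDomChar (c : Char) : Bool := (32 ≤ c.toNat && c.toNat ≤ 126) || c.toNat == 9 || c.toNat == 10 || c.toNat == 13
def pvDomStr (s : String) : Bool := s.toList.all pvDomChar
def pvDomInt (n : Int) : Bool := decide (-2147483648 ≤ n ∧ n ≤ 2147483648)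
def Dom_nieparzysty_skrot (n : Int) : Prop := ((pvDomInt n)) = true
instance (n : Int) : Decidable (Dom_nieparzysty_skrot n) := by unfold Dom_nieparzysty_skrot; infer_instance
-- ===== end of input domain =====

-- B replaces A's LSB-first while-loop with a potega/m accumulator pair by a plain
-- MSB-first recursion appending each odd digit by a decimal shift-and-add (objective: simpler).

-- ===== PORT A =====
-- while n > 0: peel the last digit; odd digits are added at the current place value.
def nieparzystyLoop (n potega m : Int) : Int :=
  if _h : n > 0 then
    let cyfra := PySem.Int.mod n 10
    if PySem.Int.mod cyfra 2 = 1 then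
      nieparzystyLoop (PySem.Int.floordiv n 10) (potega * 10) (m + potega * cyfra)
    else
      nieparzystyLoop (PySem.Int.floordiv n 10) potega m
  else m
termination_by n.toNat
decreasing_by
  all_goals
    rw [PySem.Int.floordiv_eq_ediv_of_pos (by omega)]
    omega

def nieparzysty_skrot (n : Int) : Int := nieparzystyLoop n 1 0

-- ===== PORT B =====
def nieparzysty_skrot_alt (n : Int) : Int :=
  if _h : n ≤ 0 then 0
  else
    let r := nieparzysty_skrot_alt (PySem.Int.floordiv n 10)
    let d := PySem.Int.mod n 10
    if PySem.Int.mod d 2 = 1 then r * 10 + d else r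
termination_by n.toNat
decreasing_by
  rw [PySem.Int.floordiv_eq_ediv_of_pos (by omega)]
  omega

-- ===== PRECONDITION & SPEC =====
def Spec_nieparzysty_skrot (n : Int) (out : Int) : Prop := out = nieparzysty_skrot_alt n
instance (n : Int) (out : Int) : Decidable (Spec_nieparzysty_skrot n out) := by unfold Spec_nieparzysty_skrot; infer_instance

-- ===== CLAIM (what is proved, stated in full; the proofs are below) =====
def Claim_equal_nieparzysty_skrot : Prop := ∀ (n : Int), Dom_nieparzysty_skrot n → Spec_nieparzysty_skrot n (nieparzysty_skrot n)

-- ===== LEMMAS AND PROOFS =====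

lemma alt_nonpos {n : Int} (h : n ≤ 0) : nieparzysty_skrot_alt n = 0 := by
  rw [nieparzysty_skrot_alt]; simp [h]

-- A's loop starting from (potega, m) computes m + potega * (B's value).
lemma loop_eq_alt (k : Nat) : ∀ (n potega m : Int), n.toNat ≤ k →
    nieparzystyLoop n potega m = m + potega * nieparzysty_skrot_alt n := by
  induction k with
  | zero =>
    intro n potega m hk
    have hn : n ≤ 0 := by omega
    rw [nieparzystyLoop, alt_nonpos hn]
    simp [not_lt.mpr hn]
  | succ k ih =>
    intro n potega m hk
    by_cases hn : n > 0
    · have hdiv : PySem.Int.floordiv n 10 = n / 10 :=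
        PySem.Int.floordiv_eq_ediv_of_pos (by omega)
      have hmod : PySem.Int.mod n 10 = n % 10 :=
        PySem.Int.mod_eq_emod_of_pos (by omega)
      have hrec : (n / 10).toNat ≤ k := by omega
      have hd2 : PySem.Int.mod (n % 10) 2 = n % 10 % 2 :=
        PySem.Int.mod_eq_emod_of_pos (by omega)
      rw [nieparzystyLoop]
      conv_rhs => rw [nieparzysty_skrot_alt]
      simp only [hn, not_le.mpr hn, dite_true, dite_false, hdiv, hmod, hd2]
      by_cases hodd : n % 10 % 2 = 1
      · simp only [hodd, if_true, ih _ _ _ hrec]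
        ring
      · simp only [if_neg hodd, ih _ _ _ hrec]
    · have hn' : n ≤ 0 := by omega
      rw [nieparzystyLoop, alt_nonpos hn']
      simp [hn]

-- ===== VERDICT (by name: the statement is the Claim_ definition above) =====
theorem nieparzysty_skrot_spec : Claim_equal_nieparzysty_skrot := by
  intro n _
  unfold Spec_nieparzysty_skrot nieparzysty_skrot
  rw [loop_eq_alt n.toNat n 1 0 le_rfl]
  ring
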